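-- pv_equiv track=rewrite | github.com/miliar/Code_Jam_Webscraper | Solutions_python/Problem_96/1014.py | solve
-- ===== SOURCE A (Python) =====
-- def solve(n, s, p, scores):
--     y = 0
--     for score in scores:
--         if score >= p + 2*max(0,p - 1):
--             # not surprising and above
--             y += 1
--         elif score >= p + 2*max(0,p - 2) and s > 0:
--             # surprising result
--             y += 1
--             s -= 1
--         else:
--             # score does not permit to reach p
--             pass
--     return y
-- ===== SOURCE B (Python) =====
-- def solve(n, s, p, scores):
--     t1 = p + 2 * max(0, p - 1)
--     t2 = p + 2 * max(0, p - 2)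
--     high = sum(1 for x in scores if x >= t1)
--     mid = sum(1 for x in scores if t2 <= x < t1)
--     return high + min(max(s, 0), mid)
-- ===== Notes on version B (the rewrite author's own statement) =====
-- stated objective: simpler
-- what changed: Replaces the budget-threading loop with two independent counts (scores >= t1, scores in [t2,t1)) combined as high + min(max(s,0), mid); correct because all surprise-eligible scores share one threshold, so the greedy budget is order-independent.
import Mathlib
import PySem

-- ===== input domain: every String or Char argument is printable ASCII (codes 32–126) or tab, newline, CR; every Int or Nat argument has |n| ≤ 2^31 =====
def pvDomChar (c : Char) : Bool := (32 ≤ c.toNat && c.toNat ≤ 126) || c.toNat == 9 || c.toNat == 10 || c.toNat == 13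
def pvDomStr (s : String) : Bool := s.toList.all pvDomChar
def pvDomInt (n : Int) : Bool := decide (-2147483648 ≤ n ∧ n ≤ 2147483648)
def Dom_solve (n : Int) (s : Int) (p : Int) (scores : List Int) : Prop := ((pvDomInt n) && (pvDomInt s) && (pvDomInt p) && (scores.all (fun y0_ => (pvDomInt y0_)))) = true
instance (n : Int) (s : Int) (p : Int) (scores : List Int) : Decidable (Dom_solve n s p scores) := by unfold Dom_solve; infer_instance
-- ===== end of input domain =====

-- B replaces A's stateful budget loop with two independent counts combined arithmetically (objective: simpler).
-- ===== PORT A =====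
def solveLoop (p : Int) : List Int → Int → Int → Int
  | [], _, y => y
  | score :: rest, s, y =>
    if score ≥ p + 2 * max 0 (p - 1) then
      solveLoop p rest s (y + 1)
    else if score ≥ p + 2 * max 0 (p - 2) ∧ s > 0 then
      solveLoop p rest (s - 1) (y + 1)
    else
      solveLoop p rest s y

def solve (n : Int) (s : Int) (p : Int) (scores : List Int) : Int :=
  solveLoop p scores s 0

-- ===== PORT B =====
def solve_alt (n : Int) (s : Int) (p : Int) (scores : List Int) : Int :=
  let t1 := p + 2 * max 0 (p - 1)
  let t2 := p + 2 * max 0 (p - 2)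
  let high : Int := (scores.countP (fun x => t1 ≤ x) : Nat)
  let mid : Int := (scores.countP (fun x => t2 ≤ x ∧ x < t1) : Nat)
  high + min (max s 0) mid

-- ===== PRECONDITION & SPEC =====
def Spec_solve (n : Int) (s : Int) (p : Int) (scores : List Int) (out : Int) : Prop := out = solve_alt n s p scores
instance (n : Int) (s : Int) (p : Int) (scores : List Int) (out : Int) : Decidable (Spec_solve n s p scores out) := by unfold Spec_solve; infer_instance

-- ===== CLAIM (what is proved, stated in full; the proofs are below) =====
def Claim_equal_solve : Prop := ∀ (n : Int) (s : Int) (p : Int) (scores : List Int), Dom_solve n s p scores → Spec_solve n s p scores (solve n s p scores)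

-- ===== LEMMAS AND PROOFS =====
lemma solveLoop_closed (p : Int) (scores : List Int) :
    ∀ (s y : Int),
      solveLoop p scores s y =
        y + ((scores.countP (fun x => p + 2 * max 0 (p - 1) ≤ x) : Nat) : Int)
          + min (max s 0)
              ((scores.countP (fun x => p + 2 * max 0 (p - 2) ≤ x ∧ x < p + 2 * max 0 (p - 1)) : Nat) : Int) := by
  induction scores with
  | nil => intro s y; simp [solveLoop]
  | cons score rest ih =>
    intro s y
    by_cases h1 : score ≥ p + 2 * max 0 (p - 1)
    · rw [show solveLoop p (score :: rest) s y = solveLoop p rest s (y + 1) from by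
        simp [solveLoop, h1]]
      rw [ih]
      simp only [List.countP_cons, decide_eq_true_eq]
      split_ifs <;> push_cast <;> omega
    · by_cases h2 : score ≥ p + 2 * max 0 (p - 2) ∧ s > 0
      · rw [show solveLoop p (score :: rest) s y = solveLoop p rest (s - 1) (y + 1) from by
          simp [solveLoop, h1, h2.1, h2.2]]
        rw [ih]
        obtain ⟨h2a, h2b⟩ := h2
        simp only [List.countP_cons, decide_eq_true_eq]
        split_ifs <;> push_cast <;> omega
      · rw [show solveLoop p (score :: rest) s y = solveLoop p rest s y from by
          simp only [solveLoop]
          rw [if_neg h1, if_neg h2]]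
        rw [ih]
        rw [Classical.not_and_iff_not_or_not] at h2
        simp only [List.countP_cons, decide_eq_true_eq]
        split_ifs <;> push_cast <;> rcases h2 with h2 | h2 <;> omega

-- ===== VERDICT (by name: the statement is the Claim_ definition above) =====
theorem solve_spec : Claim_equal_solve := by
  intro n s p scores _
  unfold Spec_solve solve solve_alt
  rw [solveLoop_closed]
  simp
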